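-- pv_equiv track=rewrite | github.com/gs7vik/python-practices-dsa-ds | 2d_dp_tabulation.py | ninjaTraining
-- ===== SOURCE A (Python) =====
-- def ninjaTraining(n, points):
--     dp = [[0] * 4 for _ in range(n)]
--
--     dp[0][0] = max(points[0][1], points[0][2])
--     dp[0][1] = max(points[0][0], points[0][2])
--     dp[0][2] = max(points[0][0], points[0][1])
--     dp[0][3] = max(points[0][1], points[0][2])
--
--     for day in range(1, n):
--         for last in range(4):
--             dp[day][last] = 0
--             for task in range(3):
--                 if task != last:
--                     point = points[day][task] + dp[day - 1][task]
--                     dp[day][last] = max(dp[day][last], point)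
--
--     return dp[n - 1][3]
-- ===== SOURCE B (Python) =====
-- def ninjaTraining(n, points):
--     memo = {}
--
--     def best(day, last):
--         key = (day, last)
--         if key in memo:
--             return memo[key]
--         if day == 0:
--             res = max(points[0][t] for t in range(3) if t != last)
--         else:
--             res = max([0] + [points[day][t] + best(day - 1, t)
--                              for t in range(3) if t != last])
--         memo[key] = res
--         return res
--
--     return best(n - 1, 3)
-- ===== Notes on version B (the rewrite author's own statement) =====
-- stated objective: alternative
-- what changed: Replaces A's bottom-up n-by-4 table fill with top-down memoized recursion f(day,last) keyed on (day,last), recursing from the last day downward, which also fixes dp[0][3]'s missing task 0.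
-- intended difference: On n == 1 with points[0][0] strictly greater than points[0][1] and points[0][2], A returns max(points[0][1], points[0][2]) because its dp[0][3] omits task 0, while B returns the intended maximum over all three tasks. — e.g. on ninjaTraining(1, [[9, 2, 3]]): A returns 3, B returns 9
import Mathlib
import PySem

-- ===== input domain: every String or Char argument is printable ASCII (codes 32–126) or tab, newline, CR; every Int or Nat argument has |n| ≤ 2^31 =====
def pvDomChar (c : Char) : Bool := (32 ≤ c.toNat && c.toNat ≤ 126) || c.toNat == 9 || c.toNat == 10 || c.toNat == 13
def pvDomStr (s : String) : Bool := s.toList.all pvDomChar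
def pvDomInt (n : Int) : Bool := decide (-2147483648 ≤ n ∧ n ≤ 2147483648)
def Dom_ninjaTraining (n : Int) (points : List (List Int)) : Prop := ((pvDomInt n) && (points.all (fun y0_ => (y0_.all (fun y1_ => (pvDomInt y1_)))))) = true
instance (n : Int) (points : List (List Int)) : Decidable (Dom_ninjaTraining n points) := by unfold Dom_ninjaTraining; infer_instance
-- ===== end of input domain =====

-- B replaces A's bottom-up n×4 table fill with top-down memoized recursion best(day, last)
-- keyed on (day, last), recursing from the last day downward (alternative decomposition);
-- on n = 1 with task 0 strictly best, B returns the full three-way max that A's dp[0][3] misses.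

-- ===== PORT A =====
-- dp[0] initialisation (row of 4 entries)
def pvRow0 (p0 : List Int) : List Int :=
  [max (PySem.List.pyGetD p0 1 0) (PySem.List.pyGetD p0 2 0),
   max (PySem.List.pyGetD p0 0 0) (PySem.List.pyGetD p0 2 0),
   max (PySem.List.pyGetD p0 0 0) (PySem.List.pyGetD p0 1 0),
   max (PySem.List.pyGetD p0 1 0) (PySem.List.pyGetD p0 2 0)]

-- the body of 'for last in range(4): for task in range(3): …' producing dp[day] from dp[day-1]
def pvStep (pd prev : List Int) : List Int :=
  (List.range 4).map (fun last =>
    (List.range 3).foldl (fun acc task =>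
      if task ≠ last then
        max acc (PySem.List.pyGetD pd (task : Int) 0 + PySem.List.pyGetD prev (task : Int) 0)
      else acc) 0)

def ninjaTraining (n : Int) (points : List (List Int)) : Int :=
  let dpLast := (PySem.List.pyRange 1 n 1).foldl
    (fun prev day => pvStep (PySem.List.pyGetD points day []) prev)
    (pvRow0 (PySem.List.pyGetD points 0 []))
  PySem.List.pyGetD dpLast 3 0

-- ===== PORT B =====
-- best(day, last): the memoized recursion, threading the memo dict through the
-- generator/comprehension loops; day is the Nat n-1 (B's entry is only claimed on Pre_, n ≥ 1)
def bestB (points : List (List Int)) (day : Nat) (last : Int)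
    (memo : PySem.Dict (Int × Int) Int) : Int × PySem.Dict (Int × Int) Int :=
  match PySem.Dict.get? memo ((day : Int), last) with
  | some v => (v, memo)
  | none =>
    match day with
    | 0 =>
      -- res = max(points[0][t] for t in range(3) if t != last)
      let res := (PySem.List.max?
          (((PySem.List.pyRange 0 3 1).filter (fun t => t ≠ last)).map
            (fun t => PySem.List.pyGetD (PySem.List.pyGetD points 0 []) t 0))
          (fun v => v)).getD 0
      (res, PySem.Dict.insert memo ((0 : Int), last) res)
    | d + 1 =>
      -- cands = [points[day][t] + best(day - 1, t) for t in range(3) if t != last]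
      let st := (PySem.List.pyRange 0 3 1).foldl
        (fun (acc : List Int × PySem.Dict (Int × Int) Int) t =>
          if t ≠ last then
            let r := bestB points d t acc.2
            (acc.1 ++ [PySem.List.pyGetD (PySem.List.pyGetD points ((d : Int) + 1) []) t 0 + r.1], r.2)
          else acc) ([], memo)
      -- res = max([0] + cands)
      let res := (PySem.List.max? ((0 : Int) :: st.1) (fun v => v)).getD 0
      (res, PySem.Dict.insert st.2 (((d : Int) + 1), last) res)

def ninjaTraining_alt (n : Int) (points : List (List Int)) : Int :=
  (bestB points (n - 1).toNat 3 PySem.Dict.empty).1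

-- ===== PRECONDITION & SPEC =====
-- A raises IndexError unless 1 ≤ n ≤ len(points) and each of the first n rows has ≥ 3 entries.
def Pre_ninjaTraining (n : Int) (points : List (List Int)) : Prop :=
  1 ≤ n ∧ n ≤ (points.length : Int) ∧ ∀ r ∈ points.take n.toNat, 3 ≤ r.length
instance (n : Int) (points : List (List Int)) : Decidable (Pre_ninjaTraining n points) := by
  unfold Pre_ninjaTraining; infer_instance

def pvWitness_ninjaTraining : Int × List (List Int) := (2, [[1, 2, 3], [3, 1, 1]])

-- On n = 1 with points[0][0] strictly larger than the other two tasks, A returns only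
-- max(points[0][1], points[0][2]) because its dp[0][3] omits task 0, while B returns the
-- intended maximum over all three tasks.
def D_ninjaTraining (n : Int) (points : List (List Int)) : Prop :=
  n = 1 ∧ (points.getD 0 []).getD 1 0 < (points.getD 0 []).getD 0 0
        ∧ (points.getD 0 []).getD 2 0 < (points.getD 0 []).getD 0 0
instance (n : Int) (points : List (List Int)) : Decidable (D_ninjaTraining n points) := by
  unfold D_ninjaTraining; infer_instance

def Spec_ninjaTraining (n : Int) (points : List (List Int)) (out : Int) : Prop :=
  ¬ D_ninjaTraining n points → out = ninjaTraining_alt n points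
instance (n : Int) (points : List (List Int)) (out : Int) : Decidable (Spec_ninjaTraining n points out) := by
  unfold Spec_ninjaTraining; infer_instance

def pvDiffWitness_ninjaTraining : Int × List (List Int) := (1, [[9, 2, 3]])
def pvDiffWitnessOut_ninjaTraining : Int × Int := (3, 9)

-- ===== CLAIM (what is proved, stated in full; the proofs are below) =====
def Claim_unchanged_ninjaTraining : Prop := ∀ (n : Int) (points : List (List Int)), Dom_ninjaTraining n points → Pre_ninjaTraining n points → Spec_ninjaTraining n points (ninjaTraining n points)
def Claim_changed_ninjaTraining : Prop := Dom_ninjaTraining (pvDiffWitness_ninjaTraining.1) (pvDiffWitness_ninjaTraining.2) ∧ Pre_ninjaTraining (pvDiffWitness_ninjaTraining.1) (pvDiffWitness_ninjaTraining.2) ∧ D_ninjaTraining (pvDiffWitness_ninjaTraining.1) (pvDiffWitness_ninjaTraining.2) ∧ ninjaTraining (pvDiffWitness_ninjaTraining.1) (pvDiffWitness_ninjaTraining.2) = pvDiffWitnessOut_ninjaTraining.1 ∧ ninjaTraining_alt (pvDiffWitness_ninjaTraining.1) (pvDiffWitness_ninjaTraining.2) = pvDiffWitnessOut_ninjaTraining.2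 ∧ pvDiffWitnessOut_ninjaTraining.1 ≠ pvDiffWitnessOut_ninjaTraining.2
def Claim_exact_ninjaTraining : Prop := ∀ (n : Int) (points : List (List Int)), Dom_ninjaTraining n points → Pre_ninjaTraining n points → D_ninjaTraining n points → ninjaTraining n points ≠ ninjaTraining_alt n points

-- ===== LEMMAS AND PROOFS =====

theorem pgNum (xs : List Int) (k : Nat) : PySem.List.pyGetD xs (k : Int) 0 = xs.getD k 0 :=
  PySem.List.pyGetD_natCast xs k 0

theorem pg0 (xs : List Int) : PySem.List.pyGetD xs 0 0 = xs.getD 0 0 := pgNum xs 0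
theorem pg1 (xs : List Int) : PySem.List.pyGetD xs 1 0 = xs.getD 1 0 := pgNum xs 1
theorem pg2 (xs : List Int) : PySem.List.pyGetD xs 2 0 = xs.getD 2 0 := pgNum xs 2
theorem pg3 (xs : List Int) : PySem.List.pyGetD xs 3 0 = xs.getD 3 0 := pgNum xs 3

-- max over a nonempty Int list, as the port's PySem.List.max?
theorem max?_cons_getD (x : Int) (xs : List Int) :
    (PySem.List.max? (x :: xs) (fun v => v)).getD 0 = xs.foldl max x := by
  induction xs generalizing x with
  | nil => rfl
  | cons y ys ih =>
    have h1 : PySem.List.max? (x :: y :: ys) (fun v => v)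
        = PySem.List.max? (max x y :: ys) (fun v => v) := by
      simp only [PySem.List.max?, List.foldl_cons]
      congr 1
      show (if x < y then some y else some x) = some (max x y)
      split_ifs with h
      · rw [max_eq_right h.le]
      · rw [max_eq_left (not_lt.mp h)]
    rw [h1, ih, List.foldl_cons]

-- the memoized values are the values of the pure recursion fB
def fB (points : List (List Int)) : Nat → Int → Int
  | 0, last =>
    (PySem.List.max?
      (((PySem.List.pyRange 0 3 1).filter (fun t => t ≠ last)).map
        (fun t => PySem.List.pyGetD (PySem.List.pyGetD points 0 []) t 0))
      (fun v => v)).getD 0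
  | d + 1, last =>
    (PySem.List.max? ((0 : Int) ::
      ((PySem.List.pyRange 0 3 1).filter (fun t => t ≠ last)).map
        (fun t => PySem.List.pyGetD (PySem.List.pyGetD points ((d : Int) + 1) []) t 0 + fB points d t))
      (fun v => v)).getD 0

def GoodB (points : List (List Int)) (memo : PySem.Dict (Int × Int) Int) : Prop :=
  ∀ (d : Nat) (l : Int) (v : Int),
    PySem.Dict.get? memo ((d : Int), l) = some v → v = fB points d l

theorem goodB_empty (points : List (List Int)) : GoodB points PySem.Dict.empty := by
  intro d l v h
  simp [PySem.Dict.get?_empty] at h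

theorem goodB_insert (points : List (List Int)) (memo : PySem.Dict (Int × Int) Int)
    (hg : GoodB points memo) (day : Nat) (last : Int) (v : Int)
    (hv : v = fB points day last) :
    GoodB points (PySem.Dict.insert memo ((day : Int), last) v) := by
  intro d l w hw
  rw [PySem.Dict.get?_insert] at hw
  split at hw
  · rename_i hk
    obtain ⟨hd, hl⟩ := Prod.mk.injEq .. ▸ hk
    have hd' : d = day := by exact_mod_cast hd
    subst hd' hl
    cases hw
    exact hv
  · exact hg d l w hw

theorem bestB_spec (points : List (List Int)) :
    ∀ (day : Nat) (last : Int) (memo : PySem.Dict (Int × Int) Int), GoodB points memo →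
      (bestB points day last memo).1 = fB points day last ∧
      GoodB points (bestB points day last memo).2 := by
  intro day
  induction day with
  | zero =>
    intro last memo hg
    rw [bestB]
    cases hmem : PySem.Dict.get? memo (((0 : Nat) : Int), last) with
    | some v =>
      exact ⟨hg 0 last v hmem, hg⟩
    | none =>
      refine ⟨rfl, ?_⟩
      exact goodB_insert points memo hg 0 last _ (by rw [fB])
  | succ d ih =>
    intro last memo hg
    -- the comprehension loop: fold over range(3), threading the memo
    have hfold : ∀ (ts : List Int) (acc : List Int) (m : PySem.Dict (Int × Int) Int),
        GoodB points m →
        (ts.foldl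
          (fun (acc : List Int × PySem.Dict (Int × Int) Int) t =>
            if t ≠ last then
              let r := bestB points d t acc.2
              (acc.1 ++ [PySem.List.pyGetD (PySem.List.pyGetD points ((d : Int) + 1) []) t 0 + r.1], r.2)
            else acc) (acc, m)).1
          = acc ++ (ts.filter (fun t => t ≠ last)).map
              (fun t => PySem.List.pyGetD (PySem.List.pyGetD points ((d : Int) + 1) []) t 0 + fB points d t) ∧
        GoodB points (ts.foldl
          (fun (acc : List Int × PySem.Dict (Int × Int) Int) t =>
            if t ≠ last then
              let r := bestB points d t acc.2
              (acc.1 ++ [PySem.List.pyGetD (PySem.List.pyGetD points ((d : Int) + 1) []) t 0 + r.1], r.2)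
            else acc) (acc, m)).2 := by
      intro ts
      induction ts with
      | nil => intro acc m hm; simp [hm]
      | cons t ts iht =>
        intro acc m hm
        by_cases ht : t = last
        · simpa [ht] using iht acc m hm
        · obtain ⟨h1, h2⟩ := ih t m hm
          have hrec := iht (acc ++ [PySem.List.pyGetD (PySem.List.pyGetD points ((d : Int) + 1) []) t 0
              + fB points d t]) (bestB points d t m).2 h2
          simp only [List.foldl_cons, if_pos ht]
          rw [h1]
          refine ⟨?_, hrec.2⟩
          rw [hrec.1]
          simp [ht]
    cases hmem : PySem.Dict.get? memo (((d + 1 : Nat) : Int), last) with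
    | some v =>
      have heq : bestB points (d + 1) last memo = (v, memo) := by rw [bestB, hmem]
      rw [heq]
      exact ⟨hg (d + 1) last v hmem, hg⟩
    | none =>
      obtain ⟨h1, h2⟩ := hfold (PySem.List.pyRange 0 3 1) [] memo hg
      have hval : (PySem.List.max? ((0 : Int) ::
          ((PySem.List.pyRange 0 3 1).foldl
            (fun (acc : List Int × PySem.Dict (Int × Int) Int) t =>
              if t ≠ last then
                let r := bestB points d t acc.2
                (acc.1 ++ [PySem.List.pyGetD (PySem.List.pyGetD points ((d : Int) + 1) []) t 0 + r.1], r.2)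
              else acc) ([], memo)).1) (fun v => v)).getD 0 = fB points (d + 1) last := by
        rw [h1, fB]
        simp
      have heq : bestB points (d + 1) last memo
          = ((PySem.List.max? ((0 : Int) ::
              ((PySem.List.pyRange 0 3 1).foldl
                (fun (acc : List Int × PySem.Dict (Int × Int) Int) t =>
                  if t ≠ last then
                    let r := bestB points d t acc.2
                    (acc.1 ++ [PySem.List.pyGetD (PySem.List.pyGetD points ((d : Int) + 1) []) t 0 + r.1], r.2)
                  else acc) ([], memo)).1) (fun v => v)).getD 0,
             PySem.Dict.insert
               (((PySem.List.pyRange 0 3 1).foldl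
                (fun (acc : List Int × PySem.Dict (Int × Int) Int) t =>
                  if t ≠ last then
                    let r := bestB points d t acc.2
                    (acc.1 ++ [PySem.List.pyGetD (PySem.List.pyGetD points ((d : Int) + 1) []) t 0 + r.1], r.2)
                  else acc) ([], memo)).2)
               (((d : Int) + 1), last)
               ((PySem.List.max? ((0 : Int) ::
                ((PySem.List.pyRange 0 3 1).foldl
                (fun (acc : List Int × PySem.Dict (Int × Int) Int) t =>
                  if t ≠ last then
                    let r := bestB points d t acc.2
                    (acc.1 ++ [PySem.List.pyGetD (PySem.List.pyGetD points ((d : Int) + 1) []) t 0 + r.1], r.2)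
                  else acc) ([], memo)).1) (fun v => v)).getD 0)) := by
        rw [bestB, hmem]
      rw [heq]
      refine ⟨hval, ?_⟩
      have hgood := goodB_insert points _ h2 (d + 1) last _ hval
      have hcast : (((d + 1 : Nat)) : Int) = (d : Int) + 1 := by push_cast; ring
      rw [hcast] at hgood
      exact hgood

-- A's dp rows, day by day
def pvArow (points : List (List Int)) : Nat → List Int
  | 0 => pvRow0 (PySem.List.pyGetD points 0 [])
  | d + 1 => pvStep (PySem.List.pyGetD points ((d : Int) + 1) []) (pvArow points d)

theorem A_fold (points : List (List Int)) (k : Nat) :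
    (PySem.List.pyRange 1 (1 + (k : Int)) 1).foldl
      (fun prev day => pvStep (PySem.List.pyGetD points day []) prev)
      (pvRow0 (PySem.List.pyGetD points 0 []))
    = pvArow points k := by
  induction k with
  | zero => rw [PySem.List.pyRange_one_eq_nil (by omega)]; rfl
  | succ k ih =>
    have hcast : (1 : Int) + ((k + 1 : Nat) : Int) = (1 + (k : Int)) + 1 := by push_cast; ring
    rw [hcast, PySem.List.pyRange_one_succ_right (by omega), List.foldl_append, ih]
    simp only [List.foldl_cons, List.foldl_nil]
    have h1k : (1 : Int) + (k : Int) = (k : Int) + 1 := by ring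
    rw [h1k, pvArow]

theorem A_eval (n : Int) (points : List (List Int)) (h : 1 ≤ n) :
    ninjaTraining n points = (pvArow points (n - 1).toNat).getD 3 0 := by
  have hc : n = 1 + (((n - 1).toNat : Nat) : Int) := by omega
  simp only [ninjaTraining]
  rw [pg3]
  conv_lhs => rw [hc]
  rw [A_fold]

theorem B_eval (n : Int) (points : List (List Int)) :
    ninjaTraining_alt n points = fB points (n - 1).toNat 3 :=
  (bestB_spec points _ 3 _ (goodB_empty points)).1

theorem range3 : PySem.List.pyRange 0 3 1 = [0, 1, 2] := by decide

theorem fB_cols (points : List (List Int)) (d : Nat) :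
    fB points d 0 = (pvArow points d).getD 0 0 ∧
    fB points d 1 = (pvArow points d).getD 1 0 ∧
    fB points d 2 = (pvArow points d).getD 2 0 := by
  induction d with
  | zero =>
    refine ⟨?_, ?_, ?_⟩ <;>
      simp [fB, range3, max?_cons_getD, pvArow, pvRow0]
  | succ d ih =>
    obtain ⟨h0, h1, h2⟩ := ih
    refine ⟨?_, ?_, ?_⟩ <;>
      simp [fB, range3, max?_cons_getD, pvArow, pvStep, List.range_succ,
        pg0, pg1, pg2, h0, h1, h2]

theorem fB_three (points : List (List Int)) (d : Nat) :
    fB points (d + 1) 3 = (pvArow points (d + 1)).getD 3 0 := by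
  obtain ⟨h0, h1, h2⟩ := fB_cols points d
  simp [fB, range3, max?_cons_getD, pvArow, pvStep, List.range_succ,
    pg0, pg1, pg2, h0, h1, h2]

theorem A_one (points : List (List Int)) :
    ninjaTraining 1 points
      = max ((points.getD 0 []).getD 1 0) ((points.getD 0 []).getD 2 0) := by
  rw [A_eval 1 points le_rfl]
  simp [pvArow, pvRow0, pg1, pg2, PySem.List.pyGetD_zero]

theorem B_one (points : List (List Int)) :
    ninjaTraining_alt 1 points
      = max (max ((points.getD 0 []).getD 0 0) ((points.getD 0 []).getD 1 0))
          ((points.getD 0 []).getD 2 0) := by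
  rw [B_eval]
  have h0 : ((1 : Int) - 1).toNat = 0 := rfl
  rw [h0]
  simp [fB, range3, max?_cons_getD, pg1, pg2, PySem.List.pyGetD_zero]

-- ===== VERDICT (by name: the statement is the Claim_ definition above) =====
theorem ninjaTraining_spec : Claim_unchanged_ninjaTraining := by
  intro n points _ pre hnD
  obtain ⟨h1, h2, _⟩ := pre
  by_cases hn : n = 1
  · subst hn
    rw [A_one, B_one]
    have hor : (points.getD 0 []).getD 0 0 ≤ (points.getD 0 []).getD 1 0 ∨
        (points.getD 0 []).getD 0 0 ≤ (points.getD 0 []).getD 2 0 := by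
      by_contra hcon
      push Not at hcon
      exact hnD ⟨rfl, by omega, by omega⟩
    simp only [Int.max_def]
    split_ifs <;> omega
  · rw [A_eval n points h1, B_eval]
    have hsplit : (n - 1).toNat = (n - 2).toNat + 1 := by omega
    rw [hsplit, fB_three]

theorem ninjaTraining_changed : Claim_changed_ninjaTraining := by
  unfold Claim_changed_ninjaTraining; decide

theorem ninjaTraining_tight : Claim_exact_ninjaTraining := by
  intro n points _ pre hd
  obtain ⟨hn, hb, hc⟩ := hd
  subst hn
  rw [A_one, B_one]
  simp only [Int.max_def]
  split_ifs <;> omega
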